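-- pv_equiv track=rewrite | github.com/mdabbas-cse/engineering-mathematics-solve-with-programming | statistics/Median/algorithm.py | intervalClass
-- ===== SOURCE A (Python) =====
-- def intervalClass(classes, classInterval):
--     initInterval = 0
--     intervalClass = []
--     for i in classes:
--         newInterval = initInterval + classInterval
--         intervalClass.append(f'{initInterval}-{newInterval}')
--         initInterval = newInterval
--
--     return intervalClass
-- ===== SOURCE B (Python) =====
-- def intervalClass(classes, classInterval):
--     return [f'{i * classInterval}-{(i + 1) * classInterval}'
--             for i in range(len(classes))]
-- ===== Notes on version B (the rewrite author's own statement) =====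
-- stated objective: simpler
-- what changed: Replaces the mutable running-sum accumulator and append loop with a comprehension over range(len(classes)) computing each boundary as i*classInterval directly from the index.
import Mathlib
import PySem

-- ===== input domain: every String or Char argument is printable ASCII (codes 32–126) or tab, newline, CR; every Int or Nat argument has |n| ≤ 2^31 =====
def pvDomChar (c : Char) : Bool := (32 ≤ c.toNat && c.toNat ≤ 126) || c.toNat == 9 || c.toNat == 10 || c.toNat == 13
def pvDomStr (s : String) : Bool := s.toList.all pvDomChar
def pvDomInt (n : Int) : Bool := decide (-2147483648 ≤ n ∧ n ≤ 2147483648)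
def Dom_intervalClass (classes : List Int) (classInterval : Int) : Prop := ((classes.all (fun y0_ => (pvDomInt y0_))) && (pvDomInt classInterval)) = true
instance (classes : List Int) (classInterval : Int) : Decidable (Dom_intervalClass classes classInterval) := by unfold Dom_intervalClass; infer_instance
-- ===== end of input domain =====

-- B replaces A's running-sum accumulator with index arithmetic: each label is computed
-- from its position as i*classInterval, via a comprehension over range(len(classes)). (objective: simpler)

-- ===== PORT A =====
-- A: fold over `classes` carrying (initInterval, accumulated list); each step appends
-- f'{initInterval}-{newInterval}' and advances initInterval by classInterval.
def intervalClass (classes : List Int) (classInterval : Int) : List String :=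
  (classes.foldl
    (fun (st : Int × List String) _ =>
      let newInterval := st.1 + classInterval
      (newInterval, st.2 ++ [PySem.Int.toStr st.1 ++ "-" ++ PySem.Int.toStr newInterval]))
    (0, [])).2

-- ===== PORT B =====
-- B: map over range(len(classes)), endpoints computed from the index.
def intervalClass_alt (classes : List Int) (classInterval : Int) : List String :=
  (List.range classes.length).map
    (fun (i : Nat) => PySem.Int.toStr ((i : Int) * classInterval) ++ "-"
      ++ PySem.Int.toStr (((i : Int) + 1) * classInterval))

-- ===== PRECONDITION & SPEC =====
def Spec_intervalClass (classes : List Int) (classInterval : Int) (out : List String) : Prop := out = intervalClass_alt classes classInterval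
instance (classes : List Int) (classInterval : Int) (out : List String) : Decidable (Spec_intervalClass classes classInterval out) := by unfold Spec_intervalClass; infer_instance

-- ===== CLAIM (what is proved, stated in full; the proofs are below) =====
def Claim_equal_intervalClass : Prop := ∀ (classes : List Int) (classInterval : Int), Dom_intervalClass classes classInterval → Spec_intervalClass classes classInterval (intervalClass classes classInterval)

-- ===== LEMMAS AND PROOFS =====

theorem intervalClass_fold_inv (l : List Int) (c : Int) (k : Nat) (acc : List String) :
    (l.foldl
      (fun (st : Int × List String) _ =>
        let newInterval := st.1 + c
        (newInterval, st.2 ++ [PySem.Int.toStr st.1 ++ "-" ++ PySem.Int.toStr newInterval]))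
      ((k : Int) * c, acc)).2
    = acc ++ (List.range l.length).map
        (fun i => PySem.Int.toStr (((k + i : Nat) : Int) * c) ++ "-"
          ++ PySem.Int.toStr ((((k + i : Nat) : Int) + 1) * c)) := by
  induction l generalizing k acc with
  | nil => simp
  | cons x xs ih =>
    simp only [List.foldl_cons, List.length_cons]
    have h1 : (k : Int) * c + c = ((k + 1 : Nat) : Int) * c := by push_cast; ring
    rw [h1, ih (k + 1), List.range_succ_eq_map, List.map_cons, List.map_map,
        List.append_assoc, List.singleton_append]
    congr 1
    refine List.cons_eq_cons.mpr ⟨?_, ?_⟩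
    · have e1 : ((k : Int)) * c = (((k + 0 : Nat)) : Int) * c := by push_cast; ring
      have e2 : ((k + 1 : Nat) : Int) * c = ((((k + 0 : Nat)) : Int) + 1) * c := by push_cast; ring
      rw [e1, e2]
    · refine List.map_congr_left ?_
      intro i _
      simp only [Function.comp_apply]
      have e1 : ((k + 1 + i : Nat) : Int) * c = ((k + (i + 1) : Nat) : Int) * c := by push_cast; ring
      have e2 : (((k + 1 + i : Nat) : Int) + 1) * c = (((k + (i + 1) : Nat) : Int) + 1) * c := by
        push_cast; ring
      rw [e1, e2]

-- ===== VERDICT (by name: the statement is the Claim_ definition above) =====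
theorem intervalClass_spec : Claim_equal_intervalClass := by
  intro classes c _
  unfold Spec_intervalClass intervalClass intervalClass_alt
  have h := intervalClass_fold_inv classes c 0 []
  simpa using h
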